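-- pv_equiv track=rewrite | github.com/kxu9gh/IEEE-Xtreme | dog.py | compute
-- ===== SOURCE A (Python) =====
-- def compute(n, k, lst):
--     n = int(n)
--     k = int(k)
--     if n <= k:
--         return 0
--     s = set(lst)
--     if len(s) <= k:
--         return 0
--     s = sorted(list(s))
--     i = 1
--     diff = []
--     while i < len(s):
--         diff.append(int(s[i]) - int(s[i-1]))
--         i += 1
--     diff = sorted(diff)
--     return sum(diff[:len(s)-k])
-- ===== SOURCE B (Python) =====
-- def compute(n, k, lst):
--     n = int(n)
--     k = int(k)
--     if n <= k:
--         return 0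
--     s = set(lst)
--     if len(s) <= k:
--         return 0
--     s = sorted(s)
--     if len(s) <= 1:
--         return 0
--     gaps = [s[i + 1] - s[i] for i in range(len(s) - 1)]
--     m = min(len(s) - k, len(gaps))
--     # rank selection by counting: t = m-th smallest gap, found by binary search
--     # on the value range -- the gap list itself is never sorted
--     lo, hi = min(gaps), max(gaps)
--     while lo < hi:
--         mid = (lo + hi) // 2
--         if sum(1 for x in gaps if x <= mid) >= m:
--             hi = mid
--         else:
--             lo = mid + 1
--     t = lo
--     below = [g for g in gaps if g < t]
--     return sum(below) + t * (m - len(below))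
-- ===== Notes on version B (the rewrite author's own statement) =====
-- stated objective: alternative
-- what changed: A sorts the gap list and sums its smallest len(set)-k entries; B never sorts the gaps: it finds the m-th smallest gap t by a counting binary search on the gap value range (least threshold whose <=-count reaches m) and returns the sum of gaps below t plus the missing copies of t.
import Mathlib
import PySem

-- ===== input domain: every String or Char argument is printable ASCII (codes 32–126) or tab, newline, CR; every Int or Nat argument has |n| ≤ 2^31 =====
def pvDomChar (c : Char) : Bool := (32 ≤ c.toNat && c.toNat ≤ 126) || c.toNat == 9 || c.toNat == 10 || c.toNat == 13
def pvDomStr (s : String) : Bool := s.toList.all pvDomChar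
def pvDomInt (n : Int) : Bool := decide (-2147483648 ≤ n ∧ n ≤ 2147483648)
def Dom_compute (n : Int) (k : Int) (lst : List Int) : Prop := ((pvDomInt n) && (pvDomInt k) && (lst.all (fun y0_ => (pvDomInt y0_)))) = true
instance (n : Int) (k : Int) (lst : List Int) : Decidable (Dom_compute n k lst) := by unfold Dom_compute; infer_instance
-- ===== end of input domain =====

-- B replaces A's sort-the-gaps-and-slice with a counting-based rank selection: it finds the
-- m-th smallest gap t by binary search on the value range, counting gaps ≤ mid (the gap list
-- is never sorted), and sums gaps below t plus the needed copies of t (objective: alternative).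
-- pyGetD with default 0 renders s[i] where every access is guarded in range; min/max of the
-- nonempty gap list are rendered with getD 0 (unreachable default).

-- ===== PORT A =====
def compute (n : Int) (k : Int) (lst : List Int) : Int :=
  if n ≤ k then 0
  else
    let s0 := PySem.Set.ofList lst
    if (s0.length : Int) ≤ k then 0
    else
      let s := PySem.List.sorted s0 (fun x => x) false
      -- while i < len(s): diff.append(s[i] - s[i-1]); i += 1
      let diff := (PySem.List.pyRange 1 (s.length : Int) 1).foldl
        (fun acc i => acc ++ [PySem.List.pyGetD s i 0 - PySem.List.pyGetD s (i - 1) 0]) []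
      let diffs := PySem.List.sorted diff (fun x => x) false
      (PySem.List.slice diffs none (some ((s.length : Int) - k))).sum

-- ===== PORT B =====
-- the while lo < hi loop of B, recursing on the shrinking interval
def bsearchGapT (gaps : List Int) (m : Int) (lo : Int) (hi : Int) : Int :=
  if h : lo < hi then
    let mid := PySem.Int.floordiv (lo + hi) 2
    if m ≤ ((gaps.filter (fun x => x ≤ mid)).length : Int) then bsearchGapT gaps m lo mid
    else bsearchGapT gaps m (mid + 1) hi
  else lo
termination_by (hi - lo).toNat
decreasing_by
  · have : PySem.Int.floordiv (lo + hi) 2 < hi := by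
      rw [PySem.Int.floordiv_lt_iff_lt_mul (by omega)]
      omega
    omega
  · have hb := PySem.Int.floordiv_two_mid_bounds (le_of_lt h)
    omega

def compute_alt (n : Int) (k : Int) (lst : List Int) : Int :=
  if n ≤ k then 0
  else
    let s0 := PySem.Set.ofList lst
    if (s0.length : Int) ≤ k then 0
    else
      let s := PySem.List.sorted s0 (fun x => x) false
      if (s.length : Int) ≤ 1 then 0
      else
        let gaps := (PySem.List.pyRange 0 ((s.length : Int) - 1) 1).map
          (fun i => PySem.List.pyGetD s (i + 1) 0 - PySem.List.pyGetD s i 0)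
        let m := min ((s.length : Int) - k) (gaps.length : Int)
        let t := bsearchGapT gaps m ((PySem.List.min? gaps (fun x => x)).getD 0)
          ((PySem.List.max? gaps (fun x => x)).getD 0)
        let below := gaps.filter (fun g => g < t)
        below.sum + t * (m - (below.length : Int))

-- ===== PRECONDITION & SPEC =====
def Spec_compute (n : Int) (k : Int) (lst : List Int) (out : Int) : Prop := out = compute_alt n k lst
instance (n : Int) (k : Int) (lst : List Int) (out : Int) : Decidable (Spec_compute n k lst out) := by unfold Spec_compute; infer_instance

-- ===== CLAIM (what is proved, stated in full; the proofs are below) =====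
def Claim_equal_compute : Prop := ∀ (n : Int) (k : Int) (lst : List Int), Dom_compute n k lst → Spec_compute n k lst (compute n k lst)

-- ===== LEMMAS AND PROOFS =====

-- splitting a sum of elements all ≤ t into the part below t and the copies of t
lemma sum_eq_filter_lt_add_mul (u : List Int) (t : Int) (h : ∀ x ∈ u, x ≤ t) :
    u.sum = (u.filter (fun x => x < t)).sum
      + t * ((u.length : Int) - ((u.filter (fun x => x < t)).length : Int)) := by
  induction u with
  | nil => simp
  | cons x u ih =>
    have hx := h x (by simp)
    have hu : ∀ y ∈ u, y ≤ t := fun y hy => h y (by simp [hy])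
    have hfl : (u.filter (fun x => x < t)).length ≤ u.length := List.length_filter_le _ _
    by_cases hlt : x < t
    · rw [List.filter_cons_of_pos (by simpa using hlt)]
      simp only [List.sum_cons, List.length_cons, ih hu]
      push_cast
      ring
    · have hxt : x = t := le_antisymm hx (by omega)
      rw [List.filter_cons_of_neg (by simpa using hlt)]
      simp only [List.sum_cons, List.length_cons, ih hu]
      push_cast
      rw [hxt]
      ring

-- counting-based rank selection: for 1 ≤ m ≤ |gaps|, the minimum of the gaps whose
-- ≤-count reaches m is the m-th smallest gap, and summing gaps below it plus the missing
-- copies of it reproduces the sum of the m smallest gaps.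
-- the interval-halving loop lands exactly on the least threshold whose count reaches m
lemma bsearchGapT_eq_of (gaps : List Int) (m t0 : Int)
    (hP : m ≤ ((gaps.filter (fun x => x ≤ t0)).length : Int))
    (hlow : ∀ v : Int, v < t0 → ((gaps.filter (fun x => x ≤ v)).length : Int) ≤ m - 1) :
    ∀ (N : Nat) (lo hi : Int), (hi - lo).toNat ≤ N → lo ≤ t0 → t0 ≤ hi →
      bsearchGapT gaps m lo hi = t0 := by
  intro N
  induction N with
  | zero =>
    intro lo hi hN hlo hhi
    rw [bsearchGapT, dif_neg (by omega)]
    omega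
  | succ N ih =>
    intro lo hi hN hlo hhi
    rw [bsearchGapT]
    by_cases h : lo < hi
    · rw [dif_pos h]
      have hb := PySem.Int.floordiv_two_mid_bounds (le_of_lt h)
      have hmidlt : PySem.Int.floordiv (lo + hi) 2 < hi := by
        rw [PySem.Int.floordiv_lt_iff_lt_mul (by omega)]
        omega
      set mid := PySem.Int.floordiv (lo + hi) 2 with hmid
      by_cases hc : m ≤ ((gaps.filter (fun x => x ≤ mid)).length : Int)
      · rw [if_pos hc]
        have ht0mid : t0 ≤ mid := by
          by_contra hx
          rw [not_le] at hx
          have := hlow mid hx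
          omega
        exact ih lo mid (by omega) hlo ht0mid
      · rw [if_neg hc]
        have hmidt0 : mid < t0 := by
          by_contra hx
          rw [not_lt] at hx
          have hmn : (gaps.filter (fun x => x ≤ t0)).length
              ≤ (gaps.filter (fun x => x ≤ mid)).length := by
            apply List.Sublist.length_le
            apply List.monotone_filter_right
            intro x hxx
            simp only [decide_eq_true_eq] at *
            omega
          omega
        exact ih (mid + 1) hi (by omega) (by omega) hhi
    · rw [dif_neg h]
      omega

lemma rank_select (gaps : List Int) (mN : Nat) (h1 : 1 ≤ mN) (h2 : mN ≤ gaps.length) :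
    ((PySem.List.sorted gaps (fun x => x) false).take mN).sum =
      (gaps.filter (fun g => g < bsearchGapT gaps (mN : Int)
          ((PySem.List.min? gaps (fun x => x)).getD 0)
          ((PySem.List.max? gaps (fun x => x)).getD 0))).sum
      + (bsearchGapT gaps (mN : Int)
          ((PySem.List.min? gaps (fun x => x)).getD 0)
          ((PySem.List.max? gaps (fun x => x)).getD 0))
        * ((mN : Int) - ((gaps.filter (fun g => g < bsearchGapT gaps (mN : Int)
          ((PySem.List.min? gaps (fun x => x)).getD 0)
          ((PySem.List.max? gaps (fun x => x)).getD 0))).length : Int)) := by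
  set q := PySem.List.sorted gaps (fun x => x) false with hq
  have hperm : q.Perm gaps := PySem.List.sorted_perm gaps (fun x => x) false
  have hlen : q.length = gaps.length := hperm.length_eq
  have hm1 : mN - 1 < q.length := by omega
  set t0 := q[mN - 1] with ht0
  -- counts over gaps = counts over q
  have hcount : ∀ g : Int, (gaps.filter (fun x => x ≤ g)).length = (q.filter (fun x => x ≤ g)).length :=
    fun g => ((hperm.filter _).length_eq).symm
  -- every element of the first m positions is ≤ t0; every later one is ≥ t0
  have hmono : ∀ (p r : Nat) (hp : p ≤ r) (hr : r < q.length), q[p]'(by omega) ≤ q[r] :=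
    fun p r hp hr => PySem.List.sorted_id_getElem_mono gaps hp hr
  -- (b) t0 satisfies the count predicate
  have hpred_t0 : (mN : Int) ≤ ((gaps.filter (fun x => x ≤ t0)).length : Int) := by
    rw [hcount]
    have hsplit : q = q.take mN ++ q.drop mN := (List.take_append_drop mN q).symm
    have htake_all : ((q.take mN).filter (fun x => x ≤ t0)).length = mN := by
      have : ∀ x ∈ q.take mN, (fun x => decide (x ≤ t0)) x = true := by
        intro x hx
        obtain ⟨p, hp, hpx⟩ := List.getElem_of_mem hx
        have hp' : p < mN := by
          rw [List.length_take] at hp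
          omega
        simp only [← hpx, List.getElem_take]
        exact decide_eq_true (hmono p (mN - 1) (by omega) hm1)
      rw [List.filter_eq_self.mpr this, List.length_take]
      omega
    calc (mN : Int) = (((q.take mN).filter (fun x => x ≤ t0)).length : Int) := by rw [htake_all]
      _ ≤ ((q.filter (fun x => x ≤ t0)).length : Int) := by
          conv_rhs => rw [hsplit]
          rw [List.filter_append, List.length_append]
          push_cast; omega
  have ht0_mem : t0 ∈ gaps := hperm.mem_iff.mp (List.getElem_mem hm1)
  -- (c) every threshold below t0 has count at most m-1
  have hlow : ∀ v : Int, v < t0 → ((gaps.filter (fun x => x ≤ v)).length : Int) ≤ (mN : Int) - 1 := by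
    intro g hlt
    rw [hcount]
    have hsplit : q = q.take (mN - 1) ++ q.drop (mN - 1) := (List.take_append_drop _ q).symm
    have hdrop0 : ((q.drop (mN - 1)).filter (fun x => x ≤ g)).length = 0 := by
      rw [List.length_eq_zero_iff, List.filter_eq_nil_iff]
      intro x hx
      obtain ⟨p, hp, hpx⟩ := List.getElem_of_mem hx
      rw [List.getElem_drop] at hpx
      have hpl : p < q.length - (mN - 1) := by
        rw [List.length_drop] at hp
        omega
      have : t0 ≤ x := by
        rw [← hpx]
        exact hmono (mN - 1) (mN - 1 + p) (by omega) (by omega)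
      simp only [decide_eq_true_eq]
      omega
    conv_lhs => rw [hsplit]
    rw [List.filter_append, List.length_append, hdrop0]
    have := List.length_filter_le (fun x => decide (x ≤ g)) (q.take (mN - 1))
    have hlt' : (q.take (mN - 1)).length ≤ mN - 1 := by simp [List.length_take]
    push_cast
    omega
  -- the binary search lands on t0
  have hne : gaps ≠ [] := by
    intro hnil
    rw [hnil] at h2
    simp at h2
    omega
  obtain ⟨a, ha⟩ : ∃ a, PySem.List.min? gaps (fun x => x) = some a := by
    cases hm : PySem.List.min? gaps (fun x => x) with
    | none => exact absurd ((PySem.List.min?_eq_none_iff _ _).mp hm) hne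
    | some a => exact ⟨a, rfl⟩
  obtain ⟨b, hb2⟩ : ∃ b, PySem.List.max? gaps (fun x => x) = some b := by
    cases hm : PySem.List.max? gaps (fun x => x) with
    | none => exact absurd ((PySem.List.max?_eq_none_iff _ _).mp hm) hne
    | some b => exact ⟨b, rfl⟩
  have hat0 : a ≤ t0 := PySem.List.min?_isMin ha t0 ht0_mem
  have ht0b : t0 ≤ b := PySem.List.max?_isMax hb2 t0 ht0_mem
  have hteq : bsearchGapT gaps (mN : Int) ((PySem.List.min? gaps (fun x => x)).getD 0)
      ((PySem.List.max? gaps (fun x => x)).getD 0) = t0 := by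
    rw [ha, hb2]
    simp only [Option.getD_some]
    exact bsearchGapT_eq_of gaps (mN : Int) t0 hpred_t0 hlow (b - a).toNat a b (by omega) hat0 ht0b
  rw [hteq]
  -- now the sum identity with t = t0
  have hfperm : ∀ (f : Int → Bool), (gaps.filter f).length = (q.filter f).length ∧
      (gaps.filter f).sum = (q.filter f).sum :=
    fun f => ⟨((hperm.filter f).length_eq).symm, ((hperm.filter f).sum_eq).symm⟩
  obtain ⟨hfl, hfs⟩ := hfperm (fun g => g < t0)
  rw [hfl, hfs]
  -- filter over q restricts to the first m positions
  have hsplit : q = q.take mN ++ q.drop mN := (List.take_append_drop mN q).symm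
  have hdrop0 : (q.drop mN).filter (fun g => g < t0) = [] := by
    rw [List.filter_eq_nil_iff]
    intro x hx
    obtain ⟨p, hp, hpx⟩ := List.getElem_of_mem hx
    rw [List.getElem_drop] at hpx
    have hpl : p < q.length - mN := by
      rw [List.length_drop] at hp
      omega
    have : t0 ≤ x := by
      rw [← hpx]
      exact hmono (mN - 1) (mN + p) (by omega) (by omega)
    simp only [decide_eq_true_eq]
    omega
  have hfilter_take : q.filter (fun g => g < t0) = (q.take mN).filter (fun g => g < t0) := by
    conv_lhs => rw [hsplit]
    rw [List.filter_append, hdrop0, List.append_nil]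
  rw [hfilter_take]
  have hall : ∀ x ∈ q.take mN, x ≤ t0 := by
    intro x hx
    obtain ⟨p, hp, hpx⟩ := List.getElem_of_mem hx
    have hp' : p < mN := by rw [List.length_take] at hp; omega
    rw [← hpx, List.getElem_take]
    exact hmono p (mN - 1) (by omega) hm1
  have hlen_take : (q.take mN).length = mN := by rw [List.length_take]; omega
  have := sum_eq_filter_lt_add_mul (q.take mN) t0 hall
  rw [hlen_take] at this
  exact this

-- A's while-loop gap list equals B's comprehension gap list (index shift)
lemma gapsA_eq_gapsB (s : List Int) :
    (PySem.List.pyRange 1 (s.length : Int) 1).foldl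
      (fun acc i => acc ++ [PySem.List.pyGetD s i 0 - PySem.List.pyGetD s (i - 1) 0]) []
    = (PySem.List.pyRange 0 ((s.length : Int) - 1) 1).map
      (fun i => PySem.List.pyGetD s (i + 1) 0 - PySem.List.pyGetD s i 0) := by
  rw [PySem.List.foldl_append_singleton_eq_map, List.nil_append]
  apply List.ext_getElem
  · simp [PySem.List.length_pyRange_one]
  · intro j h1 h2
    simp only [List.getElem_map, PySem.List.getElem_pyRange_one]
    congr 1
    · congr 1; omega
    · congr 1; omega

-- ===== VERDICT (by name: the statement is the Claim_ definition above) =====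
theorem compute_spec : Claim_equal_compute := by
  intro n k lst _
  unfold Spec_compute compute compute_alt
  by_cases h1 : n ≤ k
  · simp [h1]
  · simp only [if_neg h1]
    by_cases h2 : ((PySem.Set.ofList lst).length : Int) ≤ k
    · simp [h2]
    · simp only [if_neg h2]
      have hlen : (PySem.List.sorted (PySem.Set.ofList lst) (fun x => x) false).length
          = (PySem.Set.ofList lst).length := PySem.List.length_sorted _ _ _
      set s := PySem.List.sorted (PySem.Set.ofList lst) (fun x => x) false with hs
      by_cases h3 : (s.length : Int) ≤ 1
      · -- len(s) ≤ 1: A's gap list is empty so the slice sums to 0; B returns 0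
        rw [if_pos h3]
        have hr : PySem.List.pyRange 1 (s.length : Int) 1 = [] :=
          PySem.List.pyRange_one_eq_nil h3
        rw [hr]
        simp only [List.foldl_nil]
        have hsn : PySem.List.sorted ([] : List Int) (fun x => x) false = [] :=
          (PySem.List.sorted_eq_nil_iff _ _ _).mpr rfl
        rw [hsn, PySem.List.slice_to _ (by omega : (0:Int) ≤ (s.length : Int) - k)]
        simp
      · rw [if_neg h3]
        rw [gapsA_eq_gapsB s]
        set gaps := (PySem.List.pyRange 0 ((s.length : Int) - 1) 1).map
          (fun i => PySem.List.pyGetD s (i + 1) 0 - PySem.List.pyGetD s i 0) with hg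
        have hL : gaps.length = s.length - 1 := by
          rw [hg]
          simp only [List.length_map, PySem.List.length_pyRange_one]
          omega
        have hks : k < (s.length : Int) := by rw [hlen]; omega
        have hs2 : 2 ≤ s.length := by omega
        set mN : Nat := min ((s.length : Int) - k).toNat gaps.length with hmN
        have hm1 : 1 ≤ mN := by rw [hmN]; omega
        have hm2 : mN ≤ gaps.length := by rw [hmN]; omega
        have hmint : min ((s.length : Int) - k) (gaps.length : Int) = (mN : Int) := by
          rw [hmN]; push_cast; omega
        have htake : (PySem.List.slice (PySem.List.sorted gaps (fun x => x) false)
              none (some ((s.length : Int) - k))).sum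
            = ((PySem.List.sorted gaps (fun x => x) false).take mN).sum := by
          rw [PySem.List.slice_to _ (by omega : (0:Int) ≤ (s.length : Int) - k)]
          have hql : (PySem.List.sorted gaps (fun x => x) false).length = gaps.length :=
            PySem.List.length_sorted _ _ _
          by_cases hc : ((s.length : Int) - k).toNat ≤ gaps.length
          · have hcm : ((s.length : Int) - k).toNat = mN := by rw [hmN]; omega
            rw [hcm]
          · rw [List.take_of_length_le (by omega),
              List.take_of_length_le (by rw [hql, hmN]; omega)]
        rw [htake, hmint]
        exact rank_select gaps mN hm1 hm2
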